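-- pv_equiv track=rewrite | github.com/mdscrow/recommend | Recommend.py | pick_best_angle
-- ===== SOURCE A (Python) =====
-- def pick_best_angle(angles,banned_indecies) -> list:
--     """
--     takes a 1d list of angles and picks the lowest unless the lowest >= 90 or banned or itself
--     """
--     lowest_index = -1
--     lowest_angle = 90
--     for angle_index in range(len(angles)):
--         if angles[angle_index] < lowest_angle and angle_index+1 not in banned_indecies and angles[angle_index] != -1:
--             lowest_angle = angles[angle_index]
--             lowest_index = angle_index + 1
--
--     return [lowest_index,lowest_angle]
-- ===== SOURCE B (Python) =====
-- def pick_best_angle(angles, banned_indecies) -> list: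
--     cands = [(angles[i], i + 1) for i in range(len(angles))
--              if angles[i] < 90 and angles[i] != -1 and i + 1 not in banned_indecies]
--     if not cands:
--         return [-1, 90]
--     best = min(cands, key=lambda p: p[0])
--     return [best[1], best[0]]
-- ===== Notes on version B (the rewrite author's own statement) =====
-- stated objective: simpler
-- what changed: Replaced A's fused running-minimum loop (two mutable accumulators updated in place) by a filter-then-reduce decomposition: one comprehension of valid (angle, index) candidates followed by min with an angle key (first minimal, matching A's tie-break), empty case returning [-1, 90].
import Mathlib
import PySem

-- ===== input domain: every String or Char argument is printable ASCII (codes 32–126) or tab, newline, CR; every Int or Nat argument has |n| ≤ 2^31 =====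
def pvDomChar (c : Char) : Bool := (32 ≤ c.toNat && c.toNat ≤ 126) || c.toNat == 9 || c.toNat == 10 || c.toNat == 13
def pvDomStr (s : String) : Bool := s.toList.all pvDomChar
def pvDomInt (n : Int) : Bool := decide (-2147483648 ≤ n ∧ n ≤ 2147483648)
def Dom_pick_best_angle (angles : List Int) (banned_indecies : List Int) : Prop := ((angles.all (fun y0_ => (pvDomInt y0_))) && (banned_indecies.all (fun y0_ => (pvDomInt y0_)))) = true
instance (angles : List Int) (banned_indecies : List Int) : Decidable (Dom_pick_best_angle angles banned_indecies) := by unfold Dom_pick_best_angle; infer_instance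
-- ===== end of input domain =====

-- Header: B replaces A's fused running-minimum accumulator loop by a filter-then-min
-- decomposition (build valid candidates once, then take the first angle-minimal one); simpler, not faster.

-- ===== PORT A =====
def pick_best_angle (angles : List Int) (banned_indecies : List Int) : List Int :=
  let st := (PySem.List.pyRange 0 (angles.length : Int) 1).foldl
    (fun (s : Int × Int) angle_index =>
      if PySem.List.pyGetD angles angle_index 0 < s.2 ∧ angle_index + 1 ∉ banned_indecies ∧
          PySem.List.pyGetD angles angle_index 0 ≠ -1
      then (angle_index + 1, PySem.List.pyGetD angles angle_index 0)
      else s) ((-1 : Int), (90 : Int))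
  [st.1, st.2]

-- ===== PORT B =====
def pick_best_angle_alt (angles : List Int) (banned_indecies : List Int) : List Int :=
  let cands := ((PySem.List.pyRange 0 (angles.length : Int) 1).filter
      (fun i => decide (PySem.List.pyGetD angles i 0 < 90 ∧ PySem.List.pyGetD angles i 0 ≠ -1 ∧
        i + 1 ∉ banned_indecies))).map
      (fun i => (PySem.List.pyGetD angles i 0, i + 1))
  match PySem.List.min? cands (fun p => p.1) with
  | some best => [best.2, best.1]
  | none => [-1, 90]

-- ===== PRECONDITION & SPEC =====
def Spec_pick_best_angle (angles : List Int) (banned_indecies : List Int) (out : List Int) : Prop := out = pick_best_angle_alt angles banned_indecies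
instance (angles : List Int) (banned_indecies : List Int) (out : List Int) : Decidable (Spec_pick_best_angle angles banned_indecies out) := by unfold Spec_pick_best_angle; infer_instance

-- ===== CLAIM (what is proved, stated in full; the proofs are below) =====
def Claim_equal_pick_best_angle : Prop := ∀ (angles : List Int) (banned_indecies : List Int), Dom_pick_best_angle angles banned_indecies → Spec_pick_best_angle angles banned_indecies (pick_best_angle angles banned_indecies)

-- ===== LEMMAS AND PROOFS =====

-- min? over a list extended on the right
theorem pv_min?_append_singleton {α κ : Type} [LT κ] [DecidableLT κ]
    (xs : List α) (y : α) (key : α → κ) :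
    PySem.List.min? (xs ++ [y]) key =
      match PySem.List.min? xs key with
      | none => some y
      | some m => if key y < key m then some y else some m := by
  simp only [PySem.List.min?, List.foldl_append, List.foldl_cons, List.foldl_nil]
  rfl

-- every pair selected by B's candidate filter/map has angle < 90
theorem pv_mem_cands (angles banned_indecies : List Int) (n : Int) (m : Int × Int)
    (hm : m ∈ ((PySem.List.pyRange 0 n 1).filter
      (fun i => decide (PySem.List.pyGetD angles i 0 < 90 ∧ PySem.List.pyGetD angles i 0 ≠ -1 ∧
        i + 1 ∉ banned_indecies))).map
      (fun i => (PySem.List.pyGetD angles i 0, i + 1))) :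
    m.1 < 90 := by
  simp only [List.mem_map, List.mem_filter, decide_eq_true_eq] at hm
  obtain ⟨i, ⟨_, h1, _, _⟩, rfl⟩ := hm
  exact h1

-- the loop of A computes the (index, angle) swap of B's first angle-minimal candidate
theorem pv_fold_eq_min (angles banned_indecies : List Int) (n : Nat) :
    (PySem.List.pyRange 0 (n : Int) 1).foldl
      (fun (s : Int × Int) angle_index =>
        if PySem.List.pyGetD angles angle_index 0 < s.2 ∧ angle_index + 1 ∉ banned_indecies ∧
            PySem.List.pyGetD angles angle_index 0 ≠ -1
        then (angle_index + 1, PySem.List.pyGetD angles angle_index 0)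
        else s) ((-1 : Int), (90 : Int)) =
    match PySem.List.min? (((PySem.List.pyRange 0 (n : Int) 1).filter
        (fun i => decide (PySem.List.pyGetD angles i 0 < 90 ∧ PySem.List.pyGetD angles i 0 ≠ -1 ∧
          i + 1 ∉ banned_indecies))).map
        (fun i => (PySem.List.pyGetD angles i 0, i + 1))) (fun p => p.1) with
    | none => ((-1 : Int), (90 : Int))
    | some m => (m.2, m.1) := by
  induction n with
  | zero => simp [PySem.List.pyRange_one_eq_nil, PySem.List.min?]
  | succ k ih =>
    have hsplit : PySem.List.pyRange 0 ((k + 1 : Nat) : Int) 1 =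
        PySem.List.pyRange 0 (k : Int) 1 ++ [(k : Int)] := by
      have := PySem.List.pyRange_one_succ_right (a := 0) (b := (k : Int)) (by positivity)
      push_cast
      push_cast at this
      exact this
    rw [hsplit, List.foldl_append, ih, List.filter_append, List.map_append]
    set cands := ((PySem.List.pyRange 0 (k : Int) 1).filter
        (fun i => decide (PySem.List.pyGetD angles i 0 < 90 ∧ PySem.List.pyGetD angles i 0 ≠ -1 ∧
          i + 1 ∉ banned_indecies))).map
        (fun i => (PySem.List.pyGetD angles i 0, i + 1)) with hcands
    by_cases hc : PySem.List.pyGetD angles (k : Int) 0 < 90 ∧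
        PySem.List.pyGetD angles (k : Int) 0 ≠ -1 ∧ (k : Int) + 1 ∉ banned_indecies
    · -- index k is a candidate
      have hdec : (decide (PySem.List.pyGetD angles (k : Int) 0 < 90 ∧
          PySem.List.pyGetD angles (k : Int) 0 ≠ -1 ∧ (k : Int) + 1 ∉ banned_indecies)) = true := by
        simp only [decide_eq_true_eq]; exact hc
      have hfil : ([(k : Int)].filter
          (fun i => decide (PySem.List.pyGetD angles i 0 < 90 ∧ PySem.List.pyGetD angles i 0 ≠ -1 ∧
            i + 1 ∉ banned_indecies))).map
          (fun i => (PySem.List.pyGetD angles i 0, i + 1)) =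
          [(PySem.List.pyGetD angles (k : Int) 0, (k : Int) + 1)] := by
        simp only [List.filter_cons, List.filter_nil, hdec, if_true, List.map_cons, List.map_nil]
      rw [hfil, pv_min?_append_singleton]
      rcases h : PySem.List.min? cands (fun p => p.1) with _ | m
      · simp only [List.foldl_cons, List.foldl_nil]
        rw [if_pos (show PySem.List.pyGetD angles (k : Int) 0 < ((-1 : Int), (90 : Int)).2 ∧
            (k : Int) + 1 ∉ banned_indecies ∧ PySem.List.pyGetD angles (k : Int) 0 ≠ -1 from
            ⟨hc.1, hc.2.2, hc.2.1⟩)]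
      · have hm90 : m.1 < 90 := pv_mem_cands angles banned_indecies (k : Int) m
          (by rw [hcands] at h; exact PySem.List.min?_mem h)
        simp only [List.foldl_cons, List.foldl_nil]
        by_cases hlt : PySem.List.pyGetD angles (k : Int) 0 < m.1
        · rw [if_pos (show PySem.List.pyGetD angles (k : Int) 0 < (m.2, m.1).2 ∧
              (k : Int) + 1 ∉ banned_indecies ∧ PySem.List.pyGetD angles (k : Int) 0 ≠ -1 from
              ⟨hlt, hc.2.2, hc.2.1⟩), if_pos hlt]
        · rw [if_neg (show ¬(PySem.List.pyGetD angles (k : Int) 0 < (m.2, m.1).2 ∧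
              (k : Int) + 1 ∉ banned_indecies ∧ PySem.List.pyGetD angles (k : Int) 0 ≠ -1) from
              fun hcon => hlt hcon.1), if_neg hlt]
    · -- index k is not a candidate
      have hdec : (decide (PySem.List.pyGetD angles (k : Int) 0 < 90 ∧
          PySem.List.pyGetD angles (k : Int) 0 ≠ -1 ∧ (k : Int) + 1 ∉ banned_indecies)) = false := by
        simp only [decide_eq_false_iff_not]; exact hc
      have hfil : ([(k : Int)].filter
          (fun i => decide (PySem.List.pyGetD angles i 0 < 90 ∧ PySem.List.pyGetD angles i 0 ≠ -1 ∧
            i + 1 ∉ banned_indecies))).map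
          (fun i => (PySem.List.pyGetD angles i 0, i + 1)) = [] := by
        simp only [List.filter_cons, List.filter_nil, hdec, Bool.false_eq_true, if_false,
          List.map_nil]
      rw [hfil, List.append_nil]
      rcases h : PySem.List.min? cands (fun p => p.1) with _ | m
      · simp only [List.foldl_cons, List.foldl_nil]
        rw [if_neg (show ¬(PySem.List.pyGetD angles (k : Int) 0 < ((-1 : Int), (90 : Int)).2 ∧
            (k : Int) + 1 ∉ banned_indecies ∧ PySem.List.pyGetD angles (k : Int) 0 ≠ -1) from
            fun hcon => hc ⟨hcon.1, hcon.2.2, hcon.2.1⟩)]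
      · have hm90 : m.1 < 90 := pv_mem_cands angles banned_indecies (k : Int) m
          (by rw [hcands] at h; exact PySem.List.min?_mem h)
        simp only [List.foldl_cons, List.foldl_nil]
        rw [if_neg (show ¬(PySem.List.pyGetD angles (k : Int) 0 < (m.2, m.1).2 ∧
            (k : Int) + 1 ∉ banned_indecies ∧ PySem.List.pyGetD angles (k : Int) 0 ≠ -1) from
            fun hcon => hc ⟨by have := hcon.1; simp only at this; linarith, hcon.2.2, hcon.2.1⟩)]

-- ===== VERDICT (by name: the statement is the Claim_ definition above) =====
theorem pick_best_angle_spec : Claim_equal_pick_best_angle := by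
  intro angles banned_indecies _
  unfold Spec_pick_best_angle
  show pick_best_angle angles banned_indecies = pick_best_angle_alt angles banned_indecies
  unfold pick_best_angle pick_best_angle_alt
  simp only []
  rw [pv_fold_eq_min angles banned_indecies angles.length]
  rcases h : PySem.List.min? (((PySem.List.pyRange 0 (angles.length : Int) 1).filter
      (fun i => decide (PySem.List.pyGetD angles i 0 < 90 ∧ PySem.List.pyGetD angles i 0 ≠ -1 ∧
        i + 1 ∉ banned_indecies))).map
      (fun i => (PySem.List.pyGetD angles i 0, i + 1))) (fun p => p.1) with _ | m <;>
    rfl
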